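-- pv_equiv track=rewrite | github.com/rebahozkoc/libreofficepythonmacros | helper.py | inside_address_spliter
-- ===== SOURCE A (Python) =====
-- def inside_address_spliter(string):
--     """Assumes string consist with letters and numbers, respectively.
--      :returns a tuple whose first element is letters second is numbers"""
--     digits = ['0', '1', '2', '3', '4', '5', '6', '7', '8', '9']
--     number = ""
--     for i in range(len(string) - 1, -1, -1):
--         if string[i] in digits:
--             number = string[i] + number
--         else:
--             return string[0:i + 1], int(number)
-- ===== SOURCE B (Python) =====
-- def inside_address_spliter(string):
--     stripped = string.rstrip("0123456789")
--     if stripped == "":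
--         return None
--     return stripped, int(string[len(stripped):])
-- ===== Notes on version B (the rewrite author's own statement) =====
-- stated objective: simpler
-- what changed: Replaces the explicit reverse index loop with incremental string-prepending by one rstrip('0123456789') boundary computation plus a slice and a single int() conversion.
-- outside the precondition, e.g. on inside_address_spliter(''): A returns None, B returns None; on inside_address_spliter('0123456789'): A returns None, B returns None; on inside_address_spliter('12a'): A raises ValueError, B raises ValueError
import Mathlib
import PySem

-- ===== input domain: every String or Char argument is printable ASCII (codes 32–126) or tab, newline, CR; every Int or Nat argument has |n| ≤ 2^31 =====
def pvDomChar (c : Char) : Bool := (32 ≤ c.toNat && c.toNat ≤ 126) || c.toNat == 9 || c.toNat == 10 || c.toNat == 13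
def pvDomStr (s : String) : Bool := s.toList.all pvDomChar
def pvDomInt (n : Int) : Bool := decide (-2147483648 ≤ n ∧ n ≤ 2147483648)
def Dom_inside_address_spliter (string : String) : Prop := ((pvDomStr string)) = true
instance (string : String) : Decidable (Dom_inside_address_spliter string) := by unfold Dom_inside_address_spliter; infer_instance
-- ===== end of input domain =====

-- B replaces A's explicit reverse index loop (prepending digit chars one by one) with a single
-- rstrip("0123456789") boundary computation plus a slice and one int() conversion (objective: simpler).
-- Pre_ excludes inputs where Python A returns no (String × Int): all-digit/empty strings (A returns None)
-- and strings whose last character is not a digit (A raises ValueError via int("")); B behaves identically there.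


-- ===== PORT A =====
-- digits = ['0', …, '9']; membership test string[i] in digits
def pvDigits : List Char := ['0', '1', '2', '3', '4', '5', '6', '7', '8', '9']

-- the for-loop of A: j is the countdown state (current index is j-1); number is the accumulated digit string.
-- When the loop falls off (j = 0) Python A returns None (no String × Int): excluded by Pre_, default value here.
-- int(number) with number = "" raises ValueError in Python: excluded by Pre_, .getD 0 here.
def pvALoop (cs : List Char) : Nat → List Char → String × Int
  | 0, _ => ("", 0)
  | j + 1, number =>
    let c := cs.getD j ' '
    if pvDigits.contains c then pvALoop cs j (c :: number)
    else (String.ofList (cs.take (j + 1)), (PySem.Int.ofChars? number).getD 0)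

def inside_address_spliter (string : String) : String × Int :=
  pvALoop string.toList string.toList.length []

-- ===== PORT B =====
-- stripped = string.rstrip("0123456789")  — drop the maximal trailing run of those chars;
-- if stripped == "" Python B returns None (excluded by Pre_); int("") would raise (excluded by Pre_): .getD 0 here.
def inside_address_spliter_alt (string : String) : String × Int :=
  let cs := string.toList
  let stripped := cs.rdropWhile (fun c => pvDigits.contains c)
  if stripped = [] then ("", 0)
  else (String.ofList stripped, (PySem.Int.ofChars? (cs.drop stripped.length)).getD 0)

-- ===== PRECONDITION & SPEC =====
-- Pre_ excludes inputs on which A returns no value of type String × Int: empty or all-digit strings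
-- (A falls off the loop and returns None) and strings whose last character is not a digit (A raises
-- ValueError via int("")); B returns None / raises identically there.
def Pre_inside_address_spliter (string : String) : Prop :=
  string.toList.any (fun c => !pvDigits.contains c) = true ∧
  pvDigits.contains (string.toList.getLastD 'a') = true
instance (string : String) : Decidable (Pre_inside_address_spliter string) := by unfold Pre_inside_address_spliter; infer_instance
def pvWitness_inside_address_spliter : String := "ab12"

def Spec_inside_address_spliter (string : String) (out : String × Int) : Prop := out = inside_address_spliter_alt string
instance (string : String) (out : String × Int) : Decidable (Spec_inside_address_spliter string out) := by unfold Spec_inside_address_spliter; infer_instance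

-- ===== CLAIM (what is proved, stated in full; the proofs are below) =====
def Claim_equal_inside_address_spliter : Prop := ∀ (string : String), Dom_inside_address_spliter string → Pre_inside_address_spliter string → Spec_inside_address_spliter string (inside_address_spliter string)

-- ===== LEMMAS AND PROOFS =====

-- characterisation of rdropWhile when a suffix is all-p and the element before it fails p
lemma rdropWhile_take_of (cs : List Char) (p : Char → Bool) (j : Nat) (hj : j < cs.length)
    (hd : ∀ c ∈ cs.drop (j + 1), p c = true) (hc : p cs[j] = false) :
    cs.rdropWhile p = cs.take (j + 1) := by
  have hsplit : cs = cs.take (j + 1) ++ cs.drop (j + 1) := (List.take_append_drop _ _).symm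
  have htake : cs.take (j + 1) = cs.take j ++ [cs[j]] := by
    rw [List.take_add_one]; simp [List.getElem?_eq_getElem hj]
  have hnil : (cs.drop (j + 1)).reverse.dropWhile p = [] :=
    List.dropWhile_eq_nil_iff.mpr (by simpa using fun x hx => hd x hx)
  unfold List.rdropWhile
  conv_lhs => rw [hsplit]
  rw [List.reverse_append, List.dropWhile_append, hnil]
  simp only [List.isEmpty_nil, if_true]
  rw [htake, List.reverse_append]
  simp [hc]

-- loop invariant: if everything from position j on is a digit and some earlier char is not,
-- the loop computes B's value.
lemma pvALoop_spec (cs : List Char) (j : Nat) (hj : j ≤ cs.length)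
    (hd : ∀ c ∈ cs.drop j, pvDigits.contains c = true)
    (hnd : ∃ c ∈ cs.take j, pvDigits.contains c = false) :
    pvALoop cs j (cs.drop j) =
      (String.ofList (cs.rdropWhile (fun c => pvDigits.contains c)),
       (PySem.Int.ofChars? (cs.drop (cs.rdropWhile (fun c => pvDigits.contains c)).length)).getD 0) := by
  induction j with
  | zero => simp at hnd
  | succ j ih =>
    have hjlt : j < cs.length := by omega
    have hdrop : cs.drop j = cs[j] :: cs.drop (j + 1) := List.drop_eq_getElem_cons hjlt
    have hgetD : cs.getD j ' ' = cs[j] := List.getD_eq_getElem cs ' ' hjlt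
    by_cases hc : pvDigits.contains cs[j] = true
    · -- digit at position j: the loop steps down to j
      have hmem : cs[j] ∈ pvDigits := by simpa using hc
      have step : pvALoop cs (j + 1) (cs.drop (j + 1)) = pvALoop cs j (cs.drop j) := by
        simp only [pvALoop, hgetD, hc, if_true]
        rw [hdrop]
      rw [step]
      apply ih (by omega)
      · intro c hcm
        rw [hdrop] at hcm
        rcases List.mem_cons.mp hcm with h | h
        · rw [h]; exact hc
        · exact hd c h
      · rcases hnd with ⟨c, hcm, hcf⟩
        have htake : cs.take (j + 1) = cs.take j ++ [cs[j]] := by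
          rw [List.take_add_one]; simp [List.getElem?_eq_getElem hjlt]
        rw [htake] at hcm
        rcases List.mem_append.mp hcm with h | h
        · exact ⟨c, h, hcf⟩
        · simp at h; rw [h] at hcf; rw [hcf] at hc; exact absurd hc (by simp)
    · -- non-digit at position j: the loop returns here
      have hcf : pvDigits.contains cs[j] = false := by simpa using hc
      have hnmem : cs[j] ∉ pvDigits := by simpa using hcf
      have hr : cs.rdropWhile (fun c => pvDigits.contains c) = cs.take (j + 1) :=
        rdropWhile_take_of cs _ j hjlt hd hcf
      have hlen : (cs.take (j + 1)).length = j + 1 := by simp; omega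
      simp only [pvALoop, hgetD, hcf, Bool.false_eq_true, if_false, hr, hlen]

-- ===== VERDICT (by name: the statement is the Claim_ definition above) =====
theorem inside_address_spliter_spec : Claim_equal_inside_address_spliter := by
  intro s _ hpre
  obtain ⟨hany, _⟩ := hpre
  have hnd : ∃ c ∈ s.toList, pvDigits.contains c = false := by
    rcases List.any_eq_true.mp hany with ⟨c, hcm, hcf⟩
    exact ⟨c, hcm, by simpa using hcf⟩
  unfold Spec_inside_address_spliter inside_address_spliter
  have hmain := pvALoop_spec s.toList s.toList.length (le_refl _)
    (by intro c hcm; rw [List.drop_length] at hcm; cases hcm)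
    (by rw [List.take_length]; exact hnd)
  simp only [List.drop_length] at hmain
  rw [hmain]
  have hne : s.toList.rdropWhile (fun c => pvDigits.contains c) ≠ [] := by
    intro h
    rcases hnd with ⟨c, hcm, hcf⟩
    have := List.rdropWhile_eq_nil_iff.mp h c hcm
    rw [hcf] at this; exact absurd this (by simp)
  unfold inside_address_spliter_alt
  simp only [hne, if_false]
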